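-- pv_equiv track=rewrite | github.com/jasoncoelho/adventOfCode2021 | 3/run.py | getGammaAndEpsilonFromOneBitCounter
-- ===== SOURCE A (Python) =====
-- def getGammaAndEpsilonFromOneBitCounter(positionsOfAboveAverageOneBits):
--
--     gamma = 0
--     epsilon = 0
--
--     for i,aboveAverageOneBits in enumerate(reversed(positionsOfAboveAverageOneBits)):
--         if aboveAverageOneBits: # common 1 bit
--             gamma |= 1
--         else:
--             epsilon |= 1
--
--         # don't want to shift if this is the last one
--         if i < len(positionsOfAboveAverageOneBits)-1:
--             epsilon <<= 1
--             gamma <<= 1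
--
--     return gamma,epsilon
-- ===== SOURCE B (Python) =====
-- def getGammaAndEpsilonFromOneBitCounter(positionsOfAboveAverageOneBits):
--     gamma = sum(1 << i for i, bit in enumerate(positionsOfAboveAverageOneBits) if bit)
--     epsilon = ((1 << len(positionsOfAboveAverageOneBits)) - 1) - gamma
--     return gamma, epsilon
-- ===== Notes on version B (the rewrite author's own statement) =====
-- stated objective: idiomatic
-- what changed: Replaced A's stateful shift-and-OR loop over the reversed list (two big accumulators, OR in a bit then shift both except on the last element) by a direct positional sum gamma = sum(1 << i for set flags) and epsilon = ((1 << n) - 1) - gamma, the n-bit complement.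
import Mathlib
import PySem

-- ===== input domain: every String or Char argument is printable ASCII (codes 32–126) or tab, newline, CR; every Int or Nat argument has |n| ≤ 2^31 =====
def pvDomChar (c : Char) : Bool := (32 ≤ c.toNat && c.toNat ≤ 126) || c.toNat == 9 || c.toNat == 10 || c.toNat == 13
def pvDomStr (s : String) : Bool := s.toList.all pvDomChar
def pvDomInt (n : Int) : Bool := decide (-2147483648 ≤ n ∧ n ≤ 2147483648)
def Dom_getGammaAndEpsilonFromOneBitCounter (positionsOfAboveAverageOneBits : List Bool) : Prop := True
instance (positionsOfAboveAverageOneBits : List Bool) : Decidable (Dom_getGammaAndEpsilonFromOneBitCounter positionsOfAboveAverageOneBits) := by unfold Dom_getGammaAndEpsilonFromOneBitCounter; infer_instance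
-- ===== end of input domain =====

-- B replaces A's shift-and-OR loop over the reversed list by a direct positional sum
-- (bit i contributes 1 << i) plus one arithmetic complement for epsilon (objective: idiomatic).

-- ===== PORT A =====
-- A's loop body, named so the proofs can speak about it (Python `x |= 1` is Int.lor here)
def pvStepA (n : Int) (ge : Int × Int) (p : Int × Bool) : Int × Int :=
  let gamma := if p.2 then Int.lor ge.1 1 else ge.1
  let epsilon := if p.2 then ge.2 else Int.lor ge.2 1
  if p.1 < n - 1 then (gamma <<< (1 : Nat), epsilon <<< (1 : Nat)) else (gamma, epsilon)

def getGammaAndEpsilonFromOneBitCounter (positionsOfAboveAverageOneBits : List Bool) : Int × Int :=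
  (PySem.List.enumerate positionsOfAboveAverageOneBits.reverse).foldl
    (pvStepA positionsOfAboveAverageOneBits.length) (0, 0)

-- ===== PORT B =====
-- the summand accumulator of Source B's `sum(1 << i for i, bit in enumerate(...) if bit)`
def pvStepB (acc : Int) (p : Int × Bool) : Int :=
  if p.2 then acc + ((1 : Int) <<< p.1.toNat) else acc

def getGammaAndEpsilonFromOneBitCounter_alt (positionsOfAboveAverageOneBits : List Bool) : Int × Int :=
  let gamma : Int := (PySem.List.enumerate positionsOfAboveAverageOneBits).foldl pvStepB 0
  let epsilon : Int := ((1 : Int) <<< positionsOfAboveAverageOneBits.length) - 1 - gamma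
  (gamma, epsilon)

-- ===== PRECONDITION & SPEC =====
def Spec_getGammaAndEpsilonFromOneBitCounter (positionsOfAboveAverageOneBits : List Bool) (out : Int × Int) : Prop := out = getGammaAndEpsilonFromOneBitCounter_alt positionsOfAboveAverageOneBits
instance (positionsOfAboveAverageOneBits : List Bool) (out : Int × Int) : Decidable (Spec_getGammaAndEpsilonFromOneBitCounter positionsOfAboveAverageOneBits out) := by unfold Spec_getGammaAndEpsilonFromOneBitCounter; infer_instance

-- ===== CLAIM (what is proved, stated in full; the proofs are below) =====
def Claim_equal_getGammaAndEpsilonFromOneBitCounter : Prop := ∀ (positionsOfAboveAverageOneBits : List Bool), Dom_getGammaAndEpsilonFromOneBitCounter positionsOfAboveAverageOneBits → Spec_getGammaAndEpsilonFromOneBitCounter positionsOfAboveAverageOneBits (getGammaAndEpsilonFromOneBitCounter positionsOfAboveAverageOneBits)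

-- ===== LEMMAS AND PROOFS =====

def pvBit (b : Bool) : Int := if b then 1 else 0

-- value of a flag list read LSB-first (list head = bit 0)
def bval : List Bool → Int
  | [] => 0
  | b :: t => pvBit b + 2 * bval t

-- reference shape of A's loop: OR-in the bit (as +) then shift, except after the last element
def runAB : Int → Int → List Bool → Int × Int
  | g, e, [] => (g, e)
  | g, e, b :: t =>
    if t.isEmpty then (g + pvBit b, e + pvBit (!b))
    else runAB (2 * (g + pvBit b)) (2 * (e + pvBit (!b))) t

-- value of a flag list read MSB-first
def msb (l : List Bool) : Int := l.foldl (fun a b => 2 * a + pvBit b) 0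

theorem nat_even_lor_one (k : Nat) : ((2 * k) ||| 1) = 2 * k + 1 := by
  have h := Nat.lor_bit false k true 0
  simpa [Nat.bit] using h

theorem int_even_lor_one (g : Int) (h0 : 0 ≤ g) (h2 : g % 2 = 0) : Int.lor g 1 = g + 1 := by
  obtain ⟨n, rfl⟩ := Int.eq_ofNat_of_zero_le h0
  obtain ⟨k, rfl⟩ : ∃ k, n = 2 * k := ⟨n / 2, by omega⟩
  have : Int.lor ((2 * k : Nat) : Int) ((1 : Nat) : Int) = (((2 * k) ||| 1 : Nat) : Int) := rfl
  rw [show ((1 : Int) = ((1 : Nat) : Int)) from rfl, this, nat_even_lor_one]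
  push_cast; ring

theorem int_shiftl_one (g : Int) : g <<< (1 : Nat) = 2 * g := by
  rw [Int.shiftLeft_eq]; ring

theorem int_one_shiftl (n : Nat) : (1 : Int) <<< n = 2 ^ n := by
  rw [Int.shiftLeft_eq]; ring

theorem msb_from (t : List Bool) : ∀ a : Int,
    t.foldl (fun a b => 2 * a + pvBit b) a = 2 ^ t.length * a + msb t := by
  induction t with
  | nil => intro a; simp [msb]
  | cons b t ih =>
    intro a
    simp only [List.foldl_cons, List.length_cons]
    rw [ih (2 * a + pvBit b), show msb (b :: t) = t.foldl (fun a b => 2 * a + pvBit b) (pvBit b) by simp [msb], ih (pvBit b)]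
    ring

theorem msb_cons (b : Bool) (l : List Bool) : msb (b :: l) = 2 ^ l.length * pvBit b + msb l := by
  have h : msb (b :: l) = l.foldl (fun a b => 2 * a + pvBit b) (2 * 0 + pvBit b) := rfl
  rw [h, show (2 * 0 + pvBit b : Int) = pvBit b by ring, msb_from]

theorem runAB_closed (t : List Bool) : ∀ g e : Int, t ≠ [] →
    runAB g e t = (2 ^ (t.length - 1) * g + msb t, 2 ^ (t.length - 1) * e + msb (t.map not)) := by
  induction t with
  | nil => intro g e h; exact absurd rfl h
  | cons b t ih =>
    intro g e _
    cases t with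
    | nil => simp [runAB, msb, pvBit]
    | cons c t' =>
      have hne : (c :: t') ≠ [] := by simp
      have hrw : runAB g e (b :: c :: t') = runAB (2 * (g + pvBit b)) (2 * (e + pvBit (!b))) (c :: t') := by
        simp [runAB]
      rw [hrw, ih _ _ hne]
      have h2 : (2 : Int) ^ ((c :: t').length - 1) * 2 = 2 ^ (c :: t').length := by
        rw [← pow_succ]; congr 1
      have hmsb := msb_cons b (c :: t')
      have hmsb' := msb_cons (!b) ((c :: t').map not)
      simp only [List.map_cons] at *
      simp only [List.length_cons, List.length_map] at hmsb' ⊢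
      simp only [List.length_cons, Nat.add_sub_cancel] at h2 hmsb ⊢
      rw [hmsb, hmsb']
      simp only [Prod.mk.injEq]
      constructor
      · linear_combination (g + pvBit b) * h2
      · linear_combination (e + pvBit (!b)) * h2

theorem msb_reverse (l : List Bool) : msb l.reverse = bval l := by
  induction l with
  | nil => rfl
  | cons b t ih =>
    rw [List.reverse_cons, show msb (t.reverse ++ [b]) = 2 * msb t.reverse + pvBit b by simp [msb, List.foldl_append], ih]
    simp [bval]; ring

theorem bval_map_not (l : List Bool) : bval (l.map not) = 2 ^ l.length - 1 - bval l := by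
  induction l with
  | nil => simp [bval]
  | cons b t ih =>
    simp only [List.map_cons, bval, ih, List.length_cons, pow_succ]
    cases b <;> simp [pvBit] <;> ring

theorem foldA (t : List Bool) : ∀ (s g e n : Int), 0 ≤ s → s + t.length = n →
    g % 2 = 0 → 0 ≤ g → e % 2 = 0 → 0 ≤ e →
    (PySem.List.enumerate t s).foldl (pvStepA n) (g, e) = runAB g e t := by
  induction t with
  | nil => intro s g e n _ _ _ _ _ _; simp [PySem.List.enumerate, runAB]
  | cons b t ih =>
    intro s g e n hs hn hg2 hg0 he2 he0
    rw [PySem.List.enumerate_cons, List.foldl_cons]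
    have hstep : pvStepA n (g, e) (s, b) =
        if s < n - 1 then (2 * (g + pvBit b), 2 * (e + pvBit (!b))) else (g + pvBit b, e + pvBit (!b)) := by
      simp only [pvStepA]
      cases b <;> simp [pvBit, int_even_lor_one g hg0 hg2, int_even_lor_one e he0 he2, int_shiftl_one]
    cases t with
    | nil =>
      have hcond : ¬ s < n - 1 := by simp at hn; omega
      rw [hstep, if_neg hcond]
      simp [PySem.List.enumerate, runAB]
    | cons c t' =>
      have hcond : s < n - 1 := by
        have := hn; simp [List.length_cons] at this; omega
      rw [hstep, if_pos hcond]
      have hb : 0 ≤ pvBit b := by cases b <;> simp [pvBit]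
      have hb' : 0 ≤ pvBit (!b) := by cases b <;> simp [pvBit]
      rw [ih (s + 1) _ _ n (by omega) (by have := hn; simp at this ⊢; omega)
        (by omega) (by omega) (by omega) (by omega)]
      simp [runAB]

theorem foldB (t : List Bool) : ∀ (s acc : Int), 0 ≤ s →
    (PySem.List.enumerate t s).foldl pvStepB acc = acc + 2 ^ s.toNat * bval t := by
  induction t with
  | nil => intro s acc _; simp [PySem.List.enumerate, bval]
  | cons b t ih =>
    intro s acc hs
    rw [PySem.List.enumerate_cons, List.foldl_cons]
    have htn : (s + 1).toNat = s.toNat + 1 := by omega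
    rw [ih (s + 1) _ (by omega), htn]
    have hstep : pvStepB acc (s, b) = acc + 2 ^ s.toNat * pvBit b := by
      cases b <;> simp [pvStepB, pvBit, int_one_shiftl]
    rw [hstep]
    simp [bval, pow_succ]; ring

-- ===== VERDICT (by name: the statement is the Claim_ definition above) =====
theorem getGammaAndEpsilonFromOneBitCounter_spec : Claim_equal_getGammaAndEpsilonFromOneBitCounter := by
  intro xs _
  unfold Spec_getGammaAndEpsilonFromOneBitCounter
  unfold getGammaAndEpsilonFromOneBitCounter getGammaAndEpsilonFromOneBitCounter_alt
  rw [foldB xs 0 0 le_rfl, foldA xs.reverse 0 0 0 xs.length le_rfl (by simp) rfl le_rfl rfl le_rfl]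
  cases xs with
  | nil => simp [runAB, bval]
  | cons y ys =>
    have hne : (y :: ys).reverse ≠ [] := by simp
    rw [runAB_closed _ _ _ hne]
    have h1 : msb (y :: ys).reverse = bval (y :: ys) := msb_reverse _
    have h2 : msb (List.map not (y :: ys).reverse) = 2 ^ (y :: ys).length - 1 - bval (y :: ys) := by
      rw [List.map_reverse, msb_reverse, bval_map_not]
    rw [h1, h2]
    simp [int_one_shiftl, Int.toNat_zero]
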